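-- pv_equiv track=rewrite | github.com/phrwtz/Whisk2 | backend/app/game.py | _scoring_line_windows
-- ===== SOURCE A (Python) =====
-- from enum import Enum
-- from typing import Deque, Dict, List, Optional, Set, Tuple
--
-- BOARD_SIZE = 8
--
-- class Mark(str, Enum):
--     O = "O"
--     X = "X"
--
-- Coord = Tuple[int, int]  # (row, col)
--
-- DIRECTIONS: List[Coord] = [
--     (0, 1),   # horizontal
--     (1, 0),   # vertical
--     (1, 1),   # diag down-right
--     (1, -1),  # diag down-left
-- ]
--
-- def in_bounds(r: int, c: int) -> bool:
--     return 0 <= r < BOARD_SIZE and 0 <= c < BOARD_SIZE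
--
-- def _window_cells(start: Coord, dr: int, dc: int, length: int) -> List[Coord]:
--     sr, sc = start
--     return [(sr + i * dr, sc + i * dc) for i in range(length)]
--
-- def _scoring_line_windows(
--     occ: Dict[Coord, Mark], mark: Mark, length: int
-- ) -> List[List[Coord]]:
--     """Return all "exact" lines of `length` for `mark`."""
--     windows: List[List[Coord]] = []
--     for r in range(BOARD_SIZE):
--         for c in range(BOARD_SIZE):
--             for dr, dc in DIRECTIONS:
--                 cells = _window_cells((r, c), dr, dc, length)
--                 if not all(in_bounds(rr, cc) for rr, cc in cells):
--                     continue
--                 if not all(occ.get((rr, cc)) == mark for rr, cc in cells):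
--                     continue
--
--                 br, bc = r - dr, c - dc
--                 ar, ac = r + length * dr, c + length * dc
--                 before_ok = (not in_bounds(br, bc)) or (occ.get((br, bc)) != mark)
--                 after_ok = (not in_bounds(ar, ac)) or (occ.get((ar, ac)) != mark)
--                 if before_ok and after_ok:
--                     windows.append(cells)
--     return windows
-- ===== SOURCE B (Python) =====
-- BOARD_SIZE = 8
--
-- DIRECTIONS = [
--     (0, 1),
--     (1, 0),
--     (1, 1),
--     (1, -1),
-- ]
--
-- def in_bounds(r, c):
--     return 0 <= r < BOARD_SIZE and 0 <= c < BOARD_SIZE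
--
-- def _is_mark(occ, mark, r, c):
--     return in_bounds(r, c) and occ.get((r, c)) == mark
--
-- def _scoring_line_windows(occ, mark, length):
--     """Run-start scan: at each maximal run's start, count its length once and
--     emit the window only when the run length is exactly `length`."""
--     windows = []
--     for r in range(BOARD_SIZE):
--         for c in range(BOARD_SIZE):
--             for dr, dc in DIRECTIONS:
--                 if _is_mark(occ, mark, r - dr, c - dc):
--                     continue  # not the start of a run in this direction
--                 k = 0
--                 rr, cc = r, c
--                 while _is_mark(occ, mark, rr, cc):
--                     k += 1
--                     rr += dr
--                     cc += dc
--                 if k == length: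
--                     windows.append([(r + i * dr, c + i * dc) for i in range(length)])
--     return windows
-- ===== Notes on version B (the rewrite author's own statement) =====
-- stated objective: faster
-- what changed: Replaces A's fixed-window test (materialise a length-sized window for every cell and direction, then check all cells plus two sentinel neighbours) by a run-start scan: act only at the start of a run, count the consecutive mark cells once, and emit the window exactly when the run length equals `length`, so no length-sized list is built for non-matching cells.
-- intended difference: For negative length A returns one empty window [] for every cell/direction whose two vacuous neighbour checks pass (an artefact of range(length) being empty), while B returns [], the intended value since no line has negative length. — e.g. on _scoring_line_windows([], "X", -1): A returns [[], [], [], [], [], [], [], [], [], [], [], [], [], [], [], [], [], [], [], [], [], [], [], [], [], [], [], [], [], []…, B returns []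
import Mathlib
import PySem

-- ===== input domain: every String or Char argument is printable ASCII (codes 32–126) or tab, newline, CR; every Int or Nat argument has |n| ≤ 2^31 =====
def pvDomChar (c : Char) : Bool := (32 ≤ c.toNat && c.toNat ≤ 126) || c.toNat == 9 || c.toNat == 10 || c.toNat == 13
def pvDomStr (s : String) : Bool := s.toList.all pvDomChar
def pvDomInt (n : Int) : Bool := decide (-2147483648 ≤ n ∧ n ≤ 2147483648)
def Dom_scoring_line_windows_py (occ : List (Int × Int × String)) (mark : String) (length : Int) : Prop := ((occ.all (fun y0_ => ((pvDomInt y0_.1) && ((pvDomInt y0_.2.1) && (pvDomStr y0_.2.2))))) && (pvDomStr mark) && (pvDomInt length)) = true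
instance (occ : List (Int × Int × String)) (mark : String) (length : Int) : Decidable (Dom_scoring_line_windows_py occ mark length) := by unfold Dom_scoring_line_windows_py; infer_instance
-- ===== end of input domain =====

-- B replaces A's fixed-window-plus-sentinel checks by a run-start scan that counts each run once
-- (faster: A builds a length-sized window for every cell×direction, B's counting is bounded by the board).

-- ===== PORT A =====
-- shared decoding of the dict argument (Python receives occ as a dict)
def pvOccDict (occ : List (Int × Int × String)) : PySem.Dict (Int × Int) String :=
  PySem.Dict.ofList (occ.map (fun t => ((t.1, t.2.1), t.2.2)))

def pvInBounds (r c : Int) : Bool := decide (0 ≤ r ∧ r < 8 ∧ 0 ≤ c ∧ c < 8)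

def pvDirections : List (Int × Int) := [(0, 1), (1, 0), (1, 1), (1, -1)]

def pvWindowCells (sr sc dr dc L : Int) : List (Int × Int) :=
  (PySem.List.pyRange 0 L 1).map (fun i => (sr + i * dr, sc + i * dc))

def scoring_line_windows_py (occ : List (Int × Int × String)) (mark : String) (length : Int) : List (List (Int × Int)) :=
  let d := pvOccDict occ
  (PySem.List.pyRange 0 8 1).foldl (fun ws r =>
    (PySem.List.pyRange 0 8 1).foldl (fun ws c =>
      pvDirections.foldl (fun ws dir =>
        let cells := pvWindowCells r c dir.1 dir.2 length
        if !(cells.all fun p => pvInBounds p.1 p.2) then ws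
        else if !(cells.all fun p => d.get? p == some mark) then ws
        else
          let before_ok := !pvInBounds (r - dir.1) (c - dir.2) || !(d.get? (r - dir.1, c - dir.2) == some mark)
          let after_ok := !pvInBounds (r + length * dir.1) (c + length * dir.2) || !(d.get? (r + length * dir.1, c + length * dir.2) == some mark)
          if before_ok && after_ok then ws ++ [cells] else ws) ws) ws) []

-- ===== PORT B =====
def pvIsMark (d : PySem.Dict (Int × Int) String) (mark : String) (r c : Int) : Bool :=
  pvInBounds r c && (d.get? (r, c) == some mark)

-- Source B's while loop; fuel 64 only makes it total (the directions are nonzero, so the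
-- in-board run the loop walks has at most 8 cells and the loop never runs 64 times).
def pvRunLen (d : PySem.Dict (Int × Int) String) (mark : String) (dr dc : Int) : Nat → Int → Int → Int
  | 0, _, _ => 0
  | Nat.succ n, r, c => if pvIsMark d mark r c then 1 + pvRunLen d mark dr dc n (r + dr) (c + dc) else 0

def scoring_line_windows_py_alt (occ : List (Int × Int × String)) (mark : String) (length : Int) : List (List (Int × Int)) :=
  let d := pvOccDict occ
  (PySem.List.pyRange 0 8 1).foldl (fun ws r =>
    (PySem.List.pyRange 0 8 1).foldl (fun ws c =>
      pvDirections.foldl (fun ws dir =>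
        if pvIsMark d mark (r - dir.1) (c - dir.2) then ws
        else if pvRunLen d mark dir.1 dir.2 64 r c == length then
          ws ++ [(PySem.List.pyRange 0 length 1).map (fun i => (r + i * dir.1, c + i * dir.2))]
        else ws) ws) ws) []

-- ===== PRECONDITION & SPEC =====
-- For negative length A returns one empty window [] for every cell/direction whose two vacuous
-- neighbour checks pass (an artefact of range(length) being empty), while B returns [], the
-- intended value since no line has negative length.
def D_scoring_line_windows_py (occ : List (Int × Int × String)) (mark : String) (length : Int) : Prop := length < 0
instance (occ : List (Int × Int × String)) (mark : String) (length : Int) : Decidable (D_scoring_line_windows_py occ mark length) := by unfold D_scoring_line_windows_py; infer_instance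

def Spec_scoring_line_windows_py (occ : List (Int × Int × String)) (mark : String) (length : Int) (out : List (List (Int × Int))) : Prop := ¬ D_scoring_line_windows_py occ mark length → out = scoring_line_windows_py_alt occ mark length
instance (occ : List (Int × Int × String)) (mark : String) (length : Int) (out : List (List (Int × Int))) : Decidable (Spec_scoring_line_windows_py occ mark length out) := by unfold Spec_scoring_line_windows_py; infer_instance

def pvDiffWitness_scoring_line_windows_py : (List (Int × Int × String)) × String × Int := ([], "X", -1)
def pvDiffWitnessOut_scoring_line_windows_py : (List (List (Int × Int))) × (List (List (Int × Int))) :=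
  ([[], [], [], [], [], [], [], [], [], [], [], [], [], [], [], [], [], [], [], [], [], [], [], [], [], [], [], [], [], [], [], [], [], [], [], [], [], [], [], [], [], [], [], [], [], [], [], [], [], [], [], [], [], [], [], [], [], [], [], [], [], [], [], [], [], [], [], [], [], [], [], [], [], [], [], [], [], [], [], [], [], [], [], [], [], [], [], [], [], [], [], [], [], [], [], [], [], [], [], [], [], [], [], [], [], [], [], [], [], [], [], [], [], [], [], [], [], [], [], [], [], [], [], [], [], [], [], [], [], [], [], [], [], [], [], [], [], [], [], [], [], [], [], [], [], [], [], [], [], [], [], [], [], [], [], [], [], [], [], [], [], [], [], [], [], [], [], [], [], [], [], [], [], [], [], [], [], [], [], [], [], [], [], [], [], [], [], [], [], [], [], [], [], [], [], [], [], [], [], [], [], [], [], [], [], [], [], [], [], [], [], [], [], [], [], [], [], [], [], [], [], [], [], [], [], [], [], [], [], [], [], [], [], [], [], [], [], [], [], [], [], [], [], [], [], [], [], [], [], [], [], [], [], [], [], []], [])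

-- ===== CLAIM (what is proved, stated in full; the proofs are below) =====
def Claim_unchanged_scoring_line_windows_py : Prop := ∀ (occ : List (Int × Int × String)) (mark : String) (length : Int), Dom_scoring_line_windows_py occ mark length → Spec_scoring_line_windows_py occ mark length (scoring_line_windows_py occ mark length)
def Claim_changed_scoring_line_windows_py : Prop := Dom_scoring_line_windows_py (pvDiffWitness_scoring_line_windows_py.1) (pvDiffWitness_scoring_line_windows_py.2.1) (pvDiffWitness_scoring_line_windows_py.2.2) ∧ D_scoring_line_windows_py (pvDiffWitness_scoring_line_windows_py.1) (pvDiffWitness_scoring_line_windows_py.2.1) (pvDiffWitness_scoring_line_windows_py.2.2) ∧ scoring_line_windows_py (pvDiffWitness_scoring_line_windows_py.1) (pvDiffWitness_scoring_line_windows_py.2.1) (pvDiffWitness_scoring_line_windows_py.2.2) = pvDiffWitnessOut_scoring_line_windows_py.1 ∧ scoring_line_windows_py_alt (pvDiffWitness_scoring_line_windows_py.1) (pvDiffWitness_scoring_line_windows_py.2.1) (pvDiffWitness_scoring_line_windows_py.2.2) = pvDiffWitnessOut_scoring_line_windows_py.2 ∧ pvDiffWitnessOut_scoring_line_windows_py.1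 ≠ pvDiffWitnessOut_scoring_line_windows_py.2
def Claim_exact_scoring_line_windows_py : Prop := ∀ (occ : List (Int × Int × String)) (mark : String) (length : Int), Dom_scoring_line_windows_py occ mark length → D_scoring_line_windows_py occ mark length → scoring_line_windows_py occ mark length ≠ scoring_line_windows_py_alt occ mark length

-- ===== LEMMAS AND PROOFS =====

theorem pv_runLen_nonneg (d : PySem.Dict (Int × Int) String) (mark : String) (dr dc : Int) :
    ∀ (n : Nat) (r c : Int), 0 ≤ pvRunLen d mark dr dc n r c := by
  intro n
  induction n with
  | zero => intro r c; simp [pvRunLen]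
  | succ n ih =>
    intro r c
    simp only [pvRunLen]
    split
    · have := ih (r + dr) (c + dc); omega
    · omega

theorem pv_runLen_eq_iff (d : PySem.Dict (Int × Int) String) (mark : String) (dr dc : Int) :
    ∀ (n : Nat) (r c : Int),
      (∃ j : Nat, j < n ∧ pvIsMark d mark (r + (j : Int) * dr) (c + (j : Int) * dc) = false) →
      ∀ k : Nat,
        (pvRunLen d mark dr dc n r c = (k : Int) ↔
          ((∀ i : Nat, i < k → pvIsMark d mark (r + (i : Int) * dr) (c + (i : Int) * dc) = true) ∧
            pvIsMark d mark (r + (k : Int) * dr) (c + (k : Int) * dc) = false)) := by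
  intro n
  induction n with
  | zero => intro r c h; obtain ⟨j, hj, _⟩ := h; omega
  | succ n ih =>
    intro r c h k
    have hshift : ∀ i : Nat, pvIsMark d mark ((r + dr) + (i : Int) * dr) ((c + dc) + (i : Int) * dc)
        = pvIsMark d mark (r + ((i + 1 : Nat) : Int) * dr) (c + ((i + 1 : Nat) : Int) * dc) := by
      intro i; congr 1 <;> push_cast <;> ring
    by_cases h0 : pvIsMark d mark r c = true
    · have hrec : pvRunLen d mark dr dc (n + 1) r c = 1 + pvRunLen d mark dr dc n (r + dr) (c + dc) := by
        simp [pvRunLen, h0]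
      obtain ⟨j, hjn, hjf⟩ := h
      have hj0 : j ≠ 0 := by
        intro e; subst e
        rw [show r + ((0 : Nat) : Int) * dr = r by push_cast; ring,
            show c + ((0 : Nat) : Int) * dc = c by push_cast; ring] at hjf
        rw [h0] at hjf; cases hjf
      have hyp' : ∃ j' : Nat, j' < n ∧ pvIsMark d mark ((r + dr) + (j' : Int) * dr) ((c + dc) + (j' : Int) * dc) = false := by
        refine ⟨j - 1, by omega, ?_⟩
        rw [hshift (j - 1), show j - 1 + 1 = j by omega]
        exact hjf
      cases k with
      | zero =>
        constructor
        · intro habs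
          rw [hrec] at habs
          have := pv_runLen_nonneg d mark dr dc n (r + dr) (c + dc)
          omega
        · rintro ⟨_, hk⟩
          rw [show r + ((0 : Nat) : Int) * dr = r by push_cast; ring,
              show c + ((0 : Nat) : Int) * dc = c by push_cast; ring] at hk
          rw [h0] at hk; cases hk
      | succ m =>
        have hIH := ih (r + dr) (c + dc) hyp' m
        rw [hrec]
        constructor
        · intro heq
          have hval : pvRunLen d mark dr dc n (r + dr) (c + dc) = (m : Int) := by push_cast at heq ⊢; omega
          obtain ⟨hfor, hlast⟩ := hIH.mp hval
          refine ⟨?_, ?_⟩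
          · intro i hi
            cases i with
            | zero =>
              rw [show r + ((0 : Nat) : Int) * dr = r by push_cast; ring,
                  show c + ((0 : Nat) : Int) * dc = c by push_cast; ring]
              exact h0
            | succ i' =>
              rw [← hshift i']
              exact hfor i' (by omega)
          · rw [← hshift m]
            exact hlast
        · rintro ⟨hfor, hlast⟩
          have hfor' : ∀ i : Nat, i < m → pvIsMark d mark ((r + dr) + (i : Int) * dr) ((c + dc) + (i : Int) * dc) = true := by
            intro i hi
            rw [hshift i]
            exact hfor (i + 1) (by omega)
          have hlast' : pvIsMark d mark ((r + dr) + ((m : Nat) : Int) * dr) ((c + dc) + ((m : Nat) : Int) * dc) = false := by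
            rw [hshift m]
            exact hlast
          have hval := hIH.mpr ⟨hfor', hlast'⟩
          rw [hval]; push_cast; ring
    · have h0' : pvIsMark d mark r c = false := by
        cases hx : pvIsMark d mark r c
        · rfl
        · exact absurd hx h0
      have hrec : pvRunLen d mark dr dc (n + 1) r c = 0 := by
        simp [pvRunLen, h0']
      rw [hrec]
      cases k with
      | zero =>
        constructor
        · intro _
          refine ⟨fun i hi => absurd hi (by omega), ?_⟩
          rw [show r + ((0 : Nat) : Int) * dr = r by push_cast; ring,
              show c + ((0 : Nat) : Int) * dc = c by push_cast; ring]
          exact h0'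
        · intro _; simp
      | succ m =>
        constructor
        · intro habs; push_cast at habs; omega
        · rintro ⟨hfor, _⟩
          have := hfor 0 (by omega)
          rw [show r + ((0 : Nat) : Int) * dr = r by push_cast; ring,
              show c + ((0 : Nat) : Int) * dc = c by push_cast; ring] at this
          rw [h0'] at this; cases this

theorem pv_cell_step_eq (d : PySem.Dict (Int × Int) String) (mark : String) (length r c dr dc : Int)
    (hr : 0 ≤ r ∧ r < 8) (hc : 0 ≤ c ∧ c < 8) (hdir : (dr, dc) ∈ pvDirections) (hlen : 0 ≤ length)
    (ws : List (List (Int × Int))) :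
    (let cells := pvWindowCells r c dr dc length
     if !(cells.all fun p => pvInBounds p.1 p.2) then ws
     else if !(cells.all fun p => d.get? p == some mark) then ws
     else
       let before_ok := !pvInBounds (r - dr) (c - dc) || !(d.get? (r - dr, c - dc) == some mark)
       let after_ok := !pvInBounds (r + length * dr) (c + length * dc) || !(d.get? (r + length * dr, c + length * dc) == some mark)
       if before_ok && after_ok then ws ++ [cells] else ws) =
    (if pvIsMark d mark (r - dr) (c - dc) then ws
     else if pvRunLen d mark dr dc 64 r c == length then
       ws ++ [(PySem.List.pyRange 0 length 1).map (fun i => (r + i * dr, c + i * dc))]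
     else ws) := by
  obtain ⟨hr0, hr8⟩ := hr
  obtain ⟨hc0, hc8⟩ := hc
  have hL : ((length.toNat : Nat) : Int) = length := Int.toNat_of_nonneg hlen
  -- index 8 is always off the board
  have h8 : pvIsMark d mark (r + (8 : Int) * dr) (c + (8 : Int) * dc) = false := by
    simp only [pvDirections, List.mem_cons, List.not_mem_nil, or_false] at hdir
    have hnb : pvInBounds (r + (8 : Int) * dr) (c + (8 : Int) * dc) = false := by
      rcases hdir with h | h | h | h <;>
        (rw [Prod.mk.injEq] at h; obtain ⟨e1, e2⟩ := h; subst e1; subst e2;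
         simp only [pvInBounds, decide_eq_false_iff_not]; push_cast; omega)
    simp [pvIsMark, hnb]
  -- the window condition of A is "all of the first `length` steps are mark cells"
  have hAll : (((pvWindowCells r c dr dc length).all fun p => pvInBounds p.1 p.2) &&
               ((pvWindowCells r c dr dc length).all fun p => d.get? p == some mark)) = true
      ↔ (∀ i : Nat, i < length.toNat → pvIsMark d mark (r + (i : Int) * dr) (c + (i : Int) * dc) = true) := by
    rw [Bool.and_eq_true, List.all_eq_true, List.all_eq_true]
    unfold pvWindowCells
    constructor
    · rintro ⟨h1, h2⟩ i hi
      have hmem : (r + (i : Int) * dr, c + (i : Int) * dc) ∈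
          (PySem.List.pyRange 0 length 1).map (fun i => (r + i * dr, c + i * dc)) :=
        List.mem_map.mpr ⟨(i : Int), PySem.List.mem_pyRange_one.mpr ⟨by omega, by omega⟩, rfl⟩
      have hb := h1 _ hmem
      have hm := h2 _ hmem
      simp only [pvIsMark, Bool.and_eq_true]
      exact ⟨hb, hm⟩
    · intro hF
      constructor <;>
        · intro p hp
          obtain ⟨i, hi, rfl⟩ := List.mem_map.mp hp
          rw [PySem.List.mem_pyRange_one] at hi
          have := hF i.toNat (by omega)
          rw [Int.toNat_of_nonneg hi.1] at this
          simp only [pvIsMark, Bool.and_eq_true] at this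
          first
            | exact this.1
            | exact this.2
  -- the run-length condition of B is the same plus the after-cell condition
  have hrun : (pvRunLen d mark dr dc 64 r c = length)
      ↔ ((∀ i : Nat, i < length.toNat → pvIsMark d mark (r + (i : Int) * dr) (c + (i : Int) * dc) = true) ∧
          pvIsMark d mark (r + length * dr) (c + length * dc) = false) := by
    have := pv_runLen_eq_iff d mark dr dc 64 r c ⟨8, by omega, by push_cast; exact h8⟩ length.toNat
    rw [hL] at this
    exact this
  -- neighbour sentinels
  have hbefore : (!pvInBounds (r - dr) (c - dc) || !(d.get? (r - dr, c - dc) == some mark))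
      = !pvIsMark d mark (r - dr) (c - dc) := by
    simp [pvIsMark]
  have hafter : (!pvInBounds (r + length * dr) (c + length * dc) || !(d.get? (r + length * dr, c + length * dc) == some mark))
      = !pvIsMark d mark (r + length * dr) (c + length * dc) := by
    simp [pvIsMark]
  by_cases hb : pvIsMark d mark (r - dr) (c - dc) = true
  · -- not a run start: both sides keep ws
    simp only [hb, if_true]
    split_ifs with g1 g2 g3
    · rfl
    · rfl
    · exfalso
      rw [hbefore, hb] at g3
      simp at g3
    · rfl
  · have hb' : pvIsMark d mark (r - dr) (c - dc) = false := by
      cases hx : pvIsMark d mark (r - dr) (c - dc)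
      · rfl
      · exact absurd hx hb
    simp only [hb', Bool.false_eq_true, if_false]
    by_cases hall : ∀ i : Nat, i < length.toNat → pvIsMark d mark (r + (i : Int) * dr) (c + (i : Int) * dc) = true
    · by_cases haft : pvIsMark d mark (r + length * dr) (c + length * dc) = false
      · -- both append
        have hA : (((pvWindowCells r c dr dc length).all fun p => pvInBounds p.1 p.2) &&
                   ((pvWindowCells r c dr dc length).all fun p => d.get? p == some mark)) = true := hAll.mpr hall
        rw [Bool.and_eq_true] at hA
        have hRL : (pvRunLen d mark dr dc 64 r c == length) = true := by
          rw [beq_iff_eq]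
          exact hrun.mpr ⟨hall, haft⟩
        rw [hA.1, hA.2, hRL]
        simp only [Bool.not_true, Bool.false_eq_true, if_false, if_true]
        rw [hbefore, hafter, hb', haft]
        simp [pvWindowCells]
      · -- run longer than `length`: neither appends
        have haft' : pvIsMark d mark (r + length * dr) (c + length * dc) = true := by
          cases hx : pvIsMark d mark (r + length * dr) (c + length * dc)
          · exact absurd hx haft
          · rfl
        have hRL : (pvRunLen d mark dr dc 64 r c == length) = false := by
          rw [beq_eq_false_iff_ne]
          intro he
          exact absurd (hrun.mp he).2 (by rw [haft']; simp)
        rw [hRL]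
        simp only [Bool.false_eq_true, if_false]
        split_ifs with g1 g2 g3
        · rfl
        · rfl
        · exfalso
          rw [hafter, haft'] at g3
          simp at g3
        · rfl
    · -- some window cell is not a mark cell: neither appends
      have hA : (((pvWindowCells r c dr dc length).all fun p => pvInBounds p.1 p.2) &&
                 ((pvWindowCells r c dr dc length).all fun p => d.get? p == some mark)) = false := by
        cases hx : (((pvWindowCells r c dr dc length).all fun p => pvInBounds p.1 p.2) &&
                    ((pvWindowCells r c dr dc length).all fun p => d.get? p == some mark))
        · rfl
        · exact absurd (hAll.mp hx) hall
      have hRL : (pvRunLen d mark dr dc 64 r c == length) = false := by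
        rw [beq_eq_false_iff_ne]
        intro he
        exact absurd (hrun.mp he).1 hall
      rw [Bool.and_eq_false_iff] at hA
      rw [hRL]
      simp only [Bool.false_eq_true, if_false]
      rcases hA with hA | hA <;> rw [hA] <;> simp

theorem pv_foldl_fixed {α β : Type} (f : β → α → β) (h : ∀ acc x, f acc x = acc) :
    ∀ (l : List α) (b : β), l.foldl f b = b := by
  intro l
  induction l with
  | nil => intro b; rfl
  | cons x xs ih => intro b; rw [List.foldl_cons, h, ih]

theorem pv_foldl_prefix {α β : Type} (f : List β → α → List β)
    (h : ∀ acc x, ∃ t, f acc x = acc ++ t) :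
    ∀ (l : List α) (b : List β), ∃ t, l.foldl f b = b ++ t := by
  intro l
  induction l with
  | nil => intro b; exact ⟨[], by simp⟩
  | cons x xs ih =>
    intro b
    obtain ⟨t1, h1⟩ := h b x
    obtain ⟨t2, h2⟩ := ih (f b x)
    exact ⟨t1 ++ t2, by rw [List.foldl_cons, h2, h1, List.append_assoc]⟩

theorem pv_foldl_strict {α β : Type} (f : List β → α → List β) (l : List α) (x0 : α)
    (hx : x0 ∈ l) (h : ∀ acc x, ∃ t, f acc x = acc ++ t)
    (hs : ∀ acc, ∃ t, t ≠ [] ∧ f acc x0 = acc ++ t) :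
    ∀ b, ∃ t, t ≠ [] ∧ l.foldl f b = b ++ t := by
  induction l with
  | nil => cases hx
  | cons a l ih =>
    intro b
    rcases List.mem_cons.mp hx with he | hm
    · subst he
      obtain ⟨t0, ht0ne, ht0⟩ := hs b
      obtain ⟨t1, ht1⟩ := pv_foldl_prefix f h l (f b x0)
      refine ⟨t0 ++ t1, by simp [ht0ne], ?_⟩
      rw [List.foldl_cons, ht1, ht0, List.append_assoc]
    · obtain ⟨t0, ht0⟩ := h b a
      obtain ⟨t1, ht1ne, ht1⟩ := ih hm (f b a)
      refine ⟨t0 ++ t1, by simp [ht1ne], ?_⟩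
      rw [List.foldl_cons, ht1, ht0, List.append_assoc]

theorem scoring_line_windows_py_spec : Claim_unchanged_scoring_line_windows_py := by
  intro occ mark length _ hnd
  have hlen : 0 ≤ length := by
    unfold D_scoring_line_windows_py at hnd; omega
  unfold scoring_line_windows_py scoring_line_windows_py_alt
  apply PySem.List.foldl_congr_mem'
  intro r hrmem ws1
  have hrb : 0 ≤ r ∧ r < 8 := PySem.List.mem_pyRange_one.mp hrmem
  apply PySem.List.foldl_congr_mem'
  intro c hcmem ws2
  have hcb : 0 ≤ c ∧ c < 8 := PySem.List.mem_pyRange_one.mp hcmem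
  apply PySem.List.foldl_congr_mem'
  intro dir hdmem ws3
  have hdir : (dir.1, dir.2) ∈ pvDirections := by rwa [Prod.mk.eta]
  exact pv_cell_step_eq (pvOccDict occ) mark length r c dir.1 dir.2 hrb hcb hdir hlen ws3

set_option maxRecDepth 4096 in
theorem scoring_line_windows_py_changed : Claim_changed_scoring_line_windows_py := by
  unfold Claim_changed_scoring_line_windows_py; decide

theorem scoring_line_windows_py_tight : Claim_exact_scoring_line_windows_py := by
  intro occ mark length _ hD
  replace hD : length < 0 := hD
  have hB : scoring_line_windows_py_alt occ mark length = [] := by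
    unfold scoring_line_windows_py_alt
    refine pv_foldl_fixed _ ?_ _ _
    intro ws r
    refine pv_foldl_fixed _ ?_ _ _
    intro ws c
    refine pv_foldl_fixed _ ?_ _ _
    intro ws dir
    have hne : (pvRunLen (pvOccDict occ) mark dir.1 dir.2 64 r c == length) = false := by
      rw [beq_eq_false_iff_ne]
      have := pv_runLen_nonneg (pvOccDict occ) mark dir.1 dir.2 64 r c
      omega
    simp only [hne, Bool.false_eq_true, if_false, ite_self]
  have hdirstep : ∀ (r c : Int) (acc : List (List (Int × Int))) (dir : Int × Int), ∃ t,
      (let cells := pvWindowCells r c dir.1 dir.2 length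
       if !(cells.all fun p => pvInBounds p.1 p.2) then acc
       else if !(cells.all fun p => (pvOccDict occ).get? p == some mark) then acc
       else
         let before_ok := !pvInBounds (r - dir.1) (c - dir.2) || !((pvOccDict occ).get? (r - dir.1, c - dir.2) == some mark)
         let after_ok := !pvInBounds (r + length * dir.1) (c + length * dir.2) || !((pvOccDict occ).get? (r + length * dir.1, c + length * dir.2) == some mark)
         if before_ok && after_ok then acc ++ [cells] else acc) = acc ++ t := by
    intro r c acc dir
    dsimp only
    split_ifs
    · exact ⟨[], by simp⟩
    · exact ⟨[], by simp⟩
    · exact ⟨[pvWindowCells r c dir.1 dir.2 length], rfl⟩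
    · exact ⟨[], by simp⟩
  have hfirst : ∀ acc : List (List (Int × Int)),
      (let cells := pvWindowCells 0 0 ((0 : Int), (1 : Int)).1 ((0 : Int), (1 : Int)).2 length
       if !(cells.all fun p => pvInBounds p.1 p.2) then acc
       else if !(cells.all fun p => (pvOccDict occ).get? p == some mark) then acc
       else
         let before_ok := !pvInBounds (0 - ((0 : Int), (1 : Int)).1) (0 - ((0 : Int), (1 : Int)).2) || !((pvOccDict occ).get? (0 - ((0 : Int), (1 : Int)).1, 0 - ((0 : Int), (1 : Int)).2) == some mark)
         let after_ok := !pvInBounds (0 + length * ((0 : Int), (1 : Int)).1) (0 + length * ((0 : Int), (1 : Int)).2) || !((pvOccDict occ).get? (0 + length * ((0 : Int), (1 : Int)).1, 0 + length * ((0 : Int), (1 : Int)).2) == some mark)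
         if before_ok && after_ok then acc ++ [cells] else acc) = acc ++ [[]] := by
    intro acc
    have hcells : pvWindowCells 0 0 ((0 : Int), (1 : Int)).1 ((0 : Int), (1 : Int)).2 length = [] := by
      unfold pvWindowCells
      rw [PySem.List.pyRange_one_eq_nil (by omega)]
      rfl
    have h1 : pvInBounds (0 - ((0 : Int), (1 : Int)).1) (0 - ((0 : Int), (1 : Int)).2) = false := by decide
    have h2 : pvInBounds (0 + length * ((0 : Int), (1 : Int)).1) (0 + length * ((0 : Int), (1 : Int)).2) = false := by
      simp only [pvInBounds, decide_eq_false_iff_not]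
      omega
    simp only [hcells, List.all_nil, Bool.not_true, Bool.false_eq_true, if_false, h1, h2,
      Bool.not_false, Bool.true_or, Bool.and_self, if_true]
  have hstrict := pv_foldl_strict
    (fun ws (r : Int) =>
      (PySem.List.pyRange 0 8 1).foldl (fun ws (c : Int) =>
        pvDirections.foldl (fun ws (dir : Int × Int) =>
          let cells := pvWindowCells r c dir.1 dir.2 length
          if !(cells.all fun p => pvInBounds p.1 p.2) then ws
          else if !(cells.all fun p => (pvOccDict occ).get? p == some mark) then ws
          else
            let before_ok := !pvInBounds (r - dir.1) (c - dir.2) || !((pvOccDict occ).get? (r - dir.1, c - dir.2) == some mark)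
            let after_ok := !pvInBounds (r + length * dir.1) (c + length * dir.2) || !((pvOccDict occ).get? (r + length * dir.1, c + length * dir.2) == some mark)
            if before_ok && after_ok then ws ++ [cells] else ws) ws) ws)
    (PySem.List.pyRange 0 8 1) 0
    (PySem.List.mem_pyRange_one.mpr ⟨by omega, by omega⟩)
    (fun acc r => pv_foldl_prefix _
      (fun acc c => pv_foldl_prefix _ (fun acc dir => hdirstep r c acc dir) pvDirections acc)
      (PySem.List.pyRange 0 8 1) acc)
    (fun acc => pv_foldl_strict _ (PySem.List.pyRange 0 8 1) 0
      (PySem.List.mem_pyRange_one.mpr ⟨by omega, by omega⟩)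
      (fun acc c => pv_foldl_prefix _ (fun acc dir => hdirstep 0 c acc dir) pvDirections acc)
      (fun acc => pv_foldl_strict _ pvDirections ((0 : Int), (1 : Int))
        (by simp [pvDirections])
        (fun acc dir => hdirstep 0 0 acc dir)
        (fun acc => ⟨[[]], by simp, hfirst acc⟩) acc)
      acc)
    []
  obtain ⟨t, htne, hteq⟩ := hstrict
  have hAeq : scoring_line_windows_py occ mark length = [] ++ t := hteq
  rw [hAeq, hB]
  simp [htne]
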